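-- pv_equiv track=rewrite | github.com/mpklu/local-mcp-server | server/src/local_mcp/discovery.py | _extract_python_dependencies
-- ===== SOURCE A (Python) =====
-- from typing import Any, Dict, List, Optional
--
-- def _extract_python_dependencies(content: str) -> List[str]:
--     """Extract import dependencies from Python script."""
--     dependencies = []
--     lines = content.split('\n')
--
--     for line in lines:
--         line = line.strip()
--         # Look for import statements
--         if line.startswith('import ') or line.startswith('from '):
--             # Extract module name
--             if line.startswith('import '):
--                 module = line[7:].split()[0]
--             else:  # from ... import
--                 module = line.split()[1]
--
--             # Skip standard library modules (simplified check)
--             if module not in ['os', 'sys', 'json', 'argparse', 'pathlib', 're']: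
--                 dependencies.append(module)
--
--     return dependencies
-- ===== SOURCE B (Python) =====
-- def _extract_python_dependencies(content):
--     """Extract import dependencies by a single character-level scan."""
--     stdlib = ('os', 'sys', 'json', 'argparse', 'pathlib', 're')
--     deps = []
--     state = 0   # 0 skip indent, 1 first word, 2 gap after keyword, 3 module word, 4 rest of line
--     word = ''
--     for ch in content + '\n':
--         if ch == '\n':
--             if state == 3 and word not in stdlib:
--                 deps.append(word)
--             state, word = 0, ''
--         elif state == 0:
--             if not ch.isspace():
--                 state, word = 1, ch
--         elif state == 1:
--             if ch.isspace():
--                 state = 2 if ch == ' ' and word in ('import', 'from') else 4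
--                 word = ''
--             else:
--                 word += ch
--         elif state == 2:
--             if not ch.isspace():
--                 state, word = 3, ch
--         elif state == 3:
--             if ch.isspace():
--                 if word not in stdlib:
--                     deps.append(word)
--                 state, word = 4, ''
--             else:
--                 word += ch
--     return deps
-- ===== Notes on version B (the rewrite author's own statement) =====
-- stated objective: alternative
-- what changed: B replaces A's per-line pipeline (split the text into lines, strip each, two startswith prefix tests, slicing/tokenising each matching line) with a single character-level finite-state scan over the whole string (states: indent / first word / gap after keyword / module word / rest of line) that builds each name incrementally and never materialises lines or token lists.
import Mathlib
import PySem

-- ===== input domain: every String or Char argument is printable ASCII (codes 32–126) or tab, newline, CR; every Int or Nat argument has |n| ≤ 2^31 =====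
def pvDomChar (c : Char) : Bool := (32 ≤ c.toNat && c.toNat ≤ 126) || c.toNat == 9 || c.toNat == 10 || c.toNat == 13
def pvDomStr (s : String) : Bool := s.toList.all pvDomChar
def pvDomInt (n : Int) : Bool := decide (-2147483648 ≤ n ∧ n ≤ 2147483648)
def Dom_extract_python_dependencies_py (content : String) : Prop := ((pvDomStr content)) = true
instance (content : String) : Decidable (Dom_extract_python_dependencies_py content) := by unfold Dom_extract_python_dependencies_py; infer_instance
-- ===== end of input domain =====

-- B replaces A's per-line strip/startswith/split pipeline with a single character-level
-- finite-state scan over the whole string (alternative decomposition, same O(n) cost).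



-- ===== PORT A =====
-- one iteration of A's loop body: strip the line, test the 'import '/'from ' prefixes,
-- extract the module by slice-then-split resp. split-then-index, filter the six stdlib names
def pyAline (deps : List String) (line : List Char) : List String :=
  let l := PySem.Chars.strip line
  if PySem.Chars.startswith l "import ".toList || PySem.Chars.startswith l "from ".toList then
    let module :=
      if PySem.Chars.startswith l "import ".toList then
        (PySem.Chars.split₀ (PySem.List.slice l (some 7) none)).headD []
      else
        (PySem.Chars.split₀ l).getD 1 []
    if ["os".toList, "sys".toList, "json".toList, "argparse".toList, "pathlib".toList, "re".toList].contains module then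
      deps
    else
      deps ++ [String.ofList module]
  else deps

def extract_python_dependencies_py (content : String) : List String :=
  (PySem.Chars.splitOn content.toList ['\n']).foldl pyAline []

-- ===== PORT B =====
-- B's stdlib tuple
def pvStd : List (List Char) :=
  ["os".toList, "sys".toList, "json".toList, "argparse".toList, "pathlib".toList, "re".toList]

-- one step of B's scanner: state 0 skip indent, 1 first word, 2 gap after keyword,
-- 3 module word, 4 rest of line; the branches follow Source B's if/elif chain in order
def pvStepB (s : Nat × List Char × List String) (c : Char) : Nat × List Char × List String :=
  match s with
  | (st, word, deps) =>
    if c = '\n' then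
      (0, [], if st = 3 ∧ ¬ pvStd.contains word then deps ++ [String.ofList word] else deps)
    else if st = 0 then
      if PySem.Chars.isspace c then (st, word, deps) else (1, [c], deps)
    else if st = 1 then
      if PySem.Chars.isspace c then
        ((if c = ' ' ∧ (word = "import".toList ∨ word = "from".toList) then 2 else 4), [], deps)
      else (st, word ++ [c], deps)
    else if st = 2 then
      if PySem.Chars.isspace c then (st, word, deps) else (3, [c], deps)
    else if st = 3 then
      if PySem.Chars.isspace c then
        (4, [], if ¬ pvStd.contains word then deps ++ [String.ofList word] else deps)
      else (st, word ++ [c], deps)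
    else (st, word, deps)

def extract_python_dependencies_py_alt (content : String) : List String :=
  ((content.toList ++ ['\n']).foldl pvStepB (0, [], [])).2.2

-- ===== PRECONDITION & SPEC =====
def Spec_extract_python_dependencies_py (content : String) (out : List String) : Prop := out = extract_python_dependencies_py_alt content
instance (content : String) (out : List String) : Decidable (Spec_extract_python_dependencies_py content out) := by unfold Spec_extract_python_dependencies_py; infer_instance

-- ===== CLAIM (what is proved, stated in full; the proofs are below) =====
def Claim_equal_extract_python_dependencies_py : Prop := ∀ (content : String), Dom_extract_python_dependencies_py content → Spec_extract_python_dependencies_py content (extract_python_dependencies_py content)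

-- ===== LEMMAS AND PROOFS =====

-- what a '\n' (or end of input) flushes out of a scanner state
def pvEmit (st : Nat) (word : List Char) : List String :=
  if st = 3 ∧ ¬ pvStd.contains word then [String.ofList word] else []

-- ---- generic split₀ machinery (first-token lemmas for the A side) ----

theorem pv_go_acc (l : List Char) (cur : List Char) (acc : List (List Char)) :
    PySem.Chars.split₀.go l cur acc = acc.reverse ++ PySem.Chars.split₀.go l cur [] := by
  induction l generalizing cur acc with
  | nil => simp [PySem.Chars.split₀.go]; split <;> simp
  | cons c rest ih =>
    simp only [PySem.Chars.split₀.go]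
    split
    · split
      · exact ih _ _
      · rw [ih [] (_ :: acc), ih [] [_]]; simp
    · exact ih _ _

theorem pv_go_word (l : List Char) (cur : List Char) (acc : List (List Char)) :
    PySem.Chars.split₀.go l cur acc =
      PySem.Chars.split₀.go (l.dropWhile (fun c => !PySem.Chars.isspace c))
        ((l.takeWhile (fun c => !PySem.Chars.isspace c)).reverse ++ cur) acc := by
  induction l generalizing cur with
  | nil => simp
  | cons c rest ih =>
    by_cases h : PySem.Chars.isspace c
    · simp [List.dropWhile_cons, List.takeWhile_cons, h]
    · simp only [PySem.Chars.split₀.go, h, if_neg, List.dropWhile_cons, List.takeWhile_cons,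
        Bool.not_eq_true] at *
      simp [h, ih (c :: cur)]

theorem pv_go_flush (l : List Char) (cur : List Char) (acc : List (List Char))
    (hl : l = [] ∨ ∃ c r, l = c :: r ∧ PySem.Chars.isspace c = true) (hcur : cur ≠ []) :
    PySem.Chars.split₀.go l cur acc = PySem.Chars.split₀.go l [] (cur.reverse :: acc) := by
  rcases hl with rfl | ⟨c, r, rfl, hc⟩
  · simp [PySem.Chars.split₀.go, hcur]
  · simp [PySem.Chars.split₀.go, hc, hcur]

theorem pv_split0_cons_space (c : Char) (rest : List Char) (h : PySem.Chars.isspace c = true) :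
    PySem.Chars.split₀ (c :: rest) = PySem.Chars.split₀ rest := by
  simp [PySem.Chars.split₀, PySem.Chars.split₀.go, h]

theorem pv_split0_lstrip (l : List Char) :
    PySem.Chars.split₀ (l.dropWhile PySem.Chars.isspace) = PySem.Chars.split₀ l := by
  induction l with
  | nil => rfl
  | cons c rest ih =>
    by_cases h : PySem.Chars.isspace c
    · rw [List.dropWhile_cons_of_pos h, ih, pv_split0_cons_space c rest h]
    · rw [List.dropWhile_cons_of_neg h]

theorem pv_split0_word_cons (w l : List Char) (hw : w ≠ [])
    (hns : ∀ c ∈ w, PySem.Chars.isspace c = false)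
    (hl : l = [] ∨ ∃ c r, l = c :: r ∧ PySem.Chars.isspace c = true) :
    PySem.Chars.split₀ (w ++ l) = w :: PySem.Chars.split₀ l := by
  have hdw : (w ++ l).dropWhile (fun c => !PySem.Chars.isspace c) = l := by
    rw [List.dropWhile_append]
    have h1 : w.dropWhile (fun c => !PySem.Chars.isspace c) = [] := by
      rw [List.dropWhile_eq_nil_iff]; intro c hc; simp [hns c hc]
    rw [h1]
    simp only [List.isEmpty_nil, if_true]
    rcases hl with rfl | ⟨c, r, rfl, hc⟩
    · simp
    · rw [List.dropWhile_cons_of_neg]; simp [hc]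
  have htw : (w ++ l).takeWhile (fun c => !PySem.Chars.isspace c) = w := by
    rw [List.takeWhile_append]
    have h1 : w.takeWhile (fun c => !PySem.Chars.isspace c) = w := by
      rw [List.takeWhile_eq_self_iff]; intro c hc; simp [hns c hc]
    rw [h1]
    simp only [if_pos rfl]
    rcases hl with rfl | ⟨c, r, rfl, hc⟩
    · simp
    · rw [List.takeWhile_cons_of_neg] <;> simp [hc]
  unfold PySem.Chars.split₀
  rw [pv_go_word, hdw, htw, pv_go_flush _ _ _ hl (by simpa using hw), pv_go_acc]
  simp

-- ---- lines of a string (structural version of split('\n')) ----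

def pvLines : List Char → List (List Char)
  | [] => [[]]
  | c :: rest =>
    if c = '\n' then [] :: pvLines rest
    else
      match pvLines rest with
      | [] => [[c]]
      | l :: ls => (c :: l) :: ls

theorem pvLines_ne_nil (cs : List Char) : pvLines cs ≠ [] := by
  cases cs with
  | nil => simp [pvLines]
  | cons c rest =>
    simp only [pvLines]
    split
    · simp
    · rcases pvLines rest with _ | ⟨h0, t0⟩ <;> simp

theorem pv_go_split (fuel : Nat) : ∀ (l cur : List Char) (acc : List (List Char)),
    l.length < fuel →
    PySem.Chars.splitOn.go ['\n'] fuel l cur acc =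
      acc.reverse ++ ((cur.reverse ++ (pvLines l).headD []) :: (pvLines l).tail) := by
  induction fuel with
  | zero => intro l cur acc h; omega
  | succ fuel ih =>
    intro l cur acc h
    cases l with
    | nil => simp [PySem.Chars.splitOn.go, pvLines]
    | cons c rest =>
      by_cases hc : c = '\n'
      · subst hc
        have hpre : ['\n'].isPrefixOf ('\n' :: rest) = true := by simp [List.isPrefixOf]
        simp only [PySem.Chars.splitOn.go, hpre, if_pos]
        rw [show List.drop ['\n'].length ('\n' :: rest) = rest from rfl]
        rw [ih rest [] _ (by simpa using Nat.lt_of_succ_lt_succ h)]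
        obtain ⟨h0, t0, hht⟩ := List.exists_cons_of_ne_nil (pvLines_ne_nil rest)
        simp [pvLines, hht]
      · have hpre : ['\n'].isPrefixOf (c :: rest) = false := by
          simp [List.isPrefixOf, Ne.symm hc]
        simp only [PySem.Chars.splitOn.go, hpre, Bool.false_eq_true, if_false]
        rw [ih rest (c :: cur) acc (by simpa using Nat.lt_of_succ_lt_succ h)]
        obtain ⟨h0, t0, hht⟩ := List.exists_cons_of_ne_nil (pvLines_ne_nil rest)
        simp only [pvLines, if_neg hc, hht]
        simp

theorem pvLines_eq (cs : List Char) : PySem.Chars.splitOn cs ['\n'] = pvLines cs := by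
  unfold PySem.Chars.splitOn
  rw [pv_go_split (cs.length + 1) cs [] [] (by omega)]
  obtain ⟨h0, t0, hht⟩ := List.exists_cons_of_ne_nil (pvLines_ne_nil cs)
  simp [hht]

theorem pvLines_no_newline (cs : List Char) : ∀ l ∈ pvLines cs, '\n' ∉ l := by
  induction cs with
  | nil =>
    intro l hl
    simp [pvLines] at hl
    simp [hl]
  | cons a rest ih =>
    intro l hl
    simp only [pvLines] at hl
    by_cases ha : a = '\n'
    · rw [if_pos ha] at hl
      rcases List.mem_cons.mp hl with rfl | hl'
      · simp
      · exact ih l hl'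
    · rw [if_neg ha] at hl
      rcases hrest : pvLines rest with _ | ⟨h0, t0⟩
      · exact absurd hrest (pvLines_ne_nil rest)
      · rw [hrest] at hl
        rcases List.mem_cons.mp hl with rfl | hl'
        · intro hmem
          rcases List.mem_cons.mp hmem with heq | hmem'
          · exact ha heq.symm
          · exact ih h0 (by rw [hrest]; exact List.mem_cons_self) hmem'
        · exact ih l (by rw [hrest]; exact List.mem_cons_of_mem h0 hl')

theorem pvLines_join (cs : List Char) :
    (pvLines cs).flatMap (· ++ ['\n']) = cs ++ ['\n'] := by
  induction cs with
  | nil => rfl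
  | cons c rest ih =>
    by_cases hc : c = '\n'
    · subst hc
      simp only [pvLines, if_pos rfl, List.flatMap_cons]
      simpa using ih
    · simp only [pvLines, if_neg hc]
      rcases hrest : pvLines rest with _ | ⟨h0, t0⟩
      · exact absurd hrest (pvLines_ne_nil rest)
      · rw [hrest, List.flatMap_cons] at ih
        simp only [List.flatMap_cons, List.cons_append, List.append_assoc] at ih ⊢
        rw [ih]

-- ---- A-side rewriting: the fold is a flatMap over lines ----

theorem pv_accA (deps : List String) (l : List Char) : pyAline deps l = deps ++ pyAline [] l := by
  simp only [pyAline]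
  split_ifs <;> simp

theorem pv_portA_flatMap (content : String) :
    extract_python_dependencies_py content =
      (PySem.Chars.splitOn content.toList ['\n']).flatMap (pyAline []) := by
  unfold extract_python_dependencies_py
  rw [show pyAline = fun deps l => deps ++ pyAline [] l from
    funext fun d => funext fun l => pv_accA d l]
  exact PySem.List.foldl_append_eq_flatMap _ _ _

-- ---- rstrip facts ----

theorem pv_isspace_nl : PySem.Chars.isspace '\n' = true := by decide

theorem pv_head_dropWhile (p : Char → Bool) (xs : List Char) : ∀ (c : Char) (t : List Char),
    xs.dropWhile p = c :: t → p c = false := by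
  induction xs with
  | nil => intro c t h; simp at h
  | cons a as ih =>
    intro c t h
    by_cases hp : p a = true
    · rw [List.dropWhile_cons_of_pos hp] at h
      exact ih c t h
    · rw [List.dropWhile_cons_of_neg hp] at h
      injection h with h1 h2
      rw [← h1]
      simpa using hp

theorem pv_import_ns : ∀ x ∈ "import".toList, PySem.Chars.isspace x = false := by
  rw [show "import".toList = ['i','m','p','o','r','t'] from rfl]
  intro x hx; fin_cases hx <;> rfl

theorem pv_from_ns : ∀ x ∈ "from".toList, PySem.Chars.isspace x = false := by
  rw [show "from".toList = ['f','r','o','m'] from rfl]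
  intro x hx; fin_cases hx <;> rfl

theorem pv_rstrip_decomp (x : List Char) :
    x = PySem.Chars.rstrip x ++ (x.reverse.takeWhile PySem.Chars.isspace).reverse := by
  simp only [PySem.Chars.rstrip]
  rw [← List.reverse_append, List.takeWhile_append_dropWhile]
  exact (List.reverse_reverse x).symm

theorem pv_rstrip_ws (t : List Char) (ht : ∀ c ∈ t, PySem.Chars.isspace c = true) :
    PySem.Chars.rstrip t = [] := by
  simp only [PySem.Chars.rstrip]
  have : t.reverse.dropWhile PySem.Chars.isspace = [] := by
    rw [List.dropWhile_eq_nil_iff]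
    intro c hc
    exact ht c (List.mem_reverse.mp hc)
  rw [this]; rfl

theorem pv_rstrip_ws_append (x t : List Char) (ht : ∀ c ∈ t, PySem.Chars.isspace c = true) :
    PySem.Chars.rstrip (x ++ t) = PySem.Chars.rstrip x := by
  simp only [PySem.Chars.rstrip, List.reverse_append]
  rw [List.dropWhile_append]
  have h1 : t.reverse.dropWhile PySem.Chars.isspace = [] := by
    rw [List.dropWhile_eq_nil_iff]
    intro c hc
    exact ht c (List.mem_reverse.mp hc)
  rw [h1]
  simp

theorem pv_rstrip_keep (x y : List Char) (hy : ∃ c ∈ y, PySem.Chars.isspace c = false) :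
    PySem.Chars.rstrip (x ++ y) = x ++ PySem.Chars.rstrip y := by
  simp only [PySem.Chars.rstrip, List.reverse_append]
  rw [List.dropWhile_append]
  have h1 : y.reverse.dropWhile PySem.Chars.isspace ≠ [] := by
    rw [Ne, List.dropWhile_eq_nil_iff]
    intro hall
    obtain ⟨c, hc, hcs⟩ := hy
    simpa [hcs] using hall c (List.mem_reverse.mpr hc)
  rw [if_neg (by simpa using h1)]
  simp

theorem pv_rstrip_nonws (x : List Char) (hx : ∀ c ∈ x, PySem.Chars.isspace c = false) :
    PySem.Chars.rstrip x = x := by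
  simp only [PySem.Chars.rstrip]
  have : x.reverse.dropWhile PySem.Chars.isspace = x.reverse := by
    cases hr : x.reverse with
    | nil => rfl
    | cons c t =>
      rw [List.dropWhile_cons_of_neg]
      simp [hx c (List.mem_reverse.mp (by rw [hr]; exact List.mem_cons_self))]
  rw [this, List.reverse_reverse]

theorem pv_rstrip_append (x y : List Char) (hx : ∀ c ∈ x, PySem.Chars.isspace c = false) :
    PySem.Chars.rstrip (x ++ y) = x ++ PySem.Chars.rstrip y := by
  by_cases hy : ∃ c ∈ y, PySem.Chars.isspace c = false
  · exact pv_rstrip_keep x y hy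
  · push_neg at hy
    have hyall : ∀ c ∈ y, PySem.Chars.isspace c = true := by
      intro c hc
      cases h : PySem.Chars.isspace c with
      | true => rfl
      | false => exact absurd h (hy c hc)
    rw [pv_rstrip_ws_append x y hyall, pv_rstrip_nonws x hx, pv_rstrip_ws y hyall, List.append_nil]

theorem pv_strip_shape (l w r : List Char)
    (hw : ∀ c ∈ w, PySem.Chars.isspace c = false)
    (hd : l.dropWhile PySem.Chars.isspace = w ++ r) :
    PySem.Chars.strip l = w ++ PySem.Chars.rstrip r := by
  simp only [PySem.Chars.strip, PySem.Chars.lstrip]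
  rw [hd, pv_rstrip_append w r hw]

theorem pv_takeWhile_word (w : List Char) (c : Char) (z : List Char)
    (hw : ∀ x ∈ w, PySem.Chars.isspace x = false) (hc : PySem.Chars.isspace c = true) :
    (w ++ c :: z).takeWhile (fun a => !PySem.Chars.isspace a) = w := by
  induction w with
  | nil => rw [List.nil_append, List.takeWhile_cons_of_neg]; simp [hc]
  | cons a w ih =>
    rw [List.cons_append, List.takeWhile_cons_of_pos (by simp [hw a (by simp)])]
    rw [ih (fun x hx => hw x (by simp [hx]))]

theorem pv_no_space_kw (s p : List Char) (h : ' ' ∉ s) (hp : ' ' ∈ p) :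
    PySem.Chars.startswith s p = false := by
  cases hb : PySem.Chars.startswith s p with
  | false => rfl
  | true =>
    obtain ⟨q, hq⟩ := (PySem.Chars.startswith_iff _ _).mp hb
    exact absurd (hq ▸ List.mem_append_left q hp) h

-- both startswith tests of A fail when the stripped line contains no space
theorem pyA_no_space (l : List Char) (h : ' ' ∉ PySem.Chars.strip l) : pyAline [] l = [] := by
  have h1 : PySem.Chars.startswith (PySem.Chars.strip l) ['i','m','p','o','r','t',' '] = false :=
    pv_no_space_kw (PySem.Chars.strip l) ['i','m','p','o','r','t',' '] h (by decide)
  have h2 : PySem.Chars.startswith (PySem.Chars.strip l) ['f','r','o','m',' '] = false :=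
    pv_no_space_kw (PySem.Chars.strip l) ['f','r','o','m',' '] h (by decide)
  simp [pyAline, h1, h2]

-- ---- B-side run lemmas ----

theorem pv_step_nl (st : Nat) (w : List Char) (d : List String) :
    pvStepB (st, w, d) '\n' = (0, [], d ++ pvEmit st w) := by
  simp only [pvStepB, pvEmit, if_pos rfl]
  split_ifs <;> simp

theorem pvStepB_deps (st : Nat) (w : List Char) (d : List String) (c : Char) :
    pvStepB (st, w, d) c =
      ((pvStepB (st, w, []) c).1, (pvStepB (st, w, []) c).2.1, d ++ (pvStepB (st, w, []) c).2.2) := by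
  simp only [pvStepB]
  split_ifs <;> simp

theorem pvFold_deps (cs : List Char) : ∀ (st : Nat) (w : List Char) (d : List String),
    cs.foldl pvStepB (st, w, d) =
      ((cs.foldl pvStepB (st, w, [])).1, (cs.foldl pvStepB (st, w, [])).2.1,
        d ++ (cs.foldl pvStepB (st, w, [])).2.2) := by
  induction cs with
  | nil => intro st w d; simp
  | cons c cs ih =>
    intro st w d
    simp only [List.foldl_cons]
    rw [pvStepB_deps st w d c]
    rcases hs : pvStepB (st, w, []) c with ⟨st', w', δ⟩
    rw [ih st' w' (d ++ δ), ih st' w' δ]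
    simp

def pvLineOut (l : List Char) : List String :=
  ((l ++ ['\n']).foldl pvStepB (0, [], [])).2.2

theorem pv_line_run (l : List Char) (d : List String) :
    List.foldl pvStepB (0, [], d) (l ++ ['\n']) = (0, [], d ++ pvLineOut l) := by
  have h2 : pvLineOut l = (pvStepB (List.foldl pvStepB (0, [], []) l) '\n').2.2 := by
    simp [pvLineOut, List.foldl_append]
  rw [List.foldl_append, pvFold_deps l 0 [] d]
  rcases hF : List.foldl pvStepB (0, ([] : List Char), ([] : List String)) l with ⟨st, w, δ⟩
  rw [hF] at h2
  simp only [List.foldl_cons, List.foldl_nil]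
  rw [pv_step_nl, h2, pv_step_nl]
  simp

theorem pv_alt_flatMap_aux (L : List (List Char)) : ∀ (d : List String),
    List.foldl pvStepB (0, [], d) (L.flatMap (· ++ ['\n'])) = (0, [], d ++ L.flatMap pvLineOut) := by
  induction L with
  | nil => intro d; simp
  | cons a L ih =>
    intro d
    simp only [List.flatMap_cons]
    rw [List.foldl_append, pv_line_run, ih]
    simp

theorem pv_alt_eq (content : String) :
    extract_python_dependencies_py_alt content = (pvLines content.toList).flatMap pvLineOut := by
  unfold extract_python_dependencies_py_alt
  rw [← pvLines_join content.toList, pv_alt_flatMap_aux]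
  simp

theorem pv_run0 (t : List Char) (ht : ∀ c ∈ t, PySem.Chars.isspace c = true ∧ c ≠ '\n')
    (rest : List Char) (d : List String) :
    List.foldl pvStepB (0, [], d) (t ++ rest) = List.foldl pvStepB (0, [], d) rest := by
  induction t with
  | nil => rfl
  | cons c t ih =>
    obtain ⟨hs, hn⟩ := ht c (by simp)
    have hstep : pvStepB (0, [], d) c = (0, [], d) := by simp [pvStepB, hn, hs]
    simp only [List.cons_append, List.foldl_cons, hstep]
    exact ih (fun x hx => ht x (by simp [hx]))

theorem pv_ne_nl (c : Char) (hs : PySem.Chars.isspace c = false) : c ≠ '\n' := by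
  intro h
  rw [h, pv_isspace_nl] at hs
  exact absurd hs (by simp)

theorem pv_run1 (u : List Char) (hu : ∀ c ∈ u, PySem.Chars.isspace c = false) :
    ∀ (w : List Char) (rest : List Char) (d : List String),
    List.foldl pvStepB (1, w, d) (u ++ rest) = List.foldl pvStepB (1, w ++ u, d) rest := by
  induction u with
  | nil => intro w rest d; simp
  | cons c u ih =>
    intro w rest d
    have hs := hu c (by simp)
    have hn := pv_ne_nl c hs
    have hstep : pvStepB (1, w, d) c = (1, w ++ [c], d) := by simp [pvStepB, hn, hs]
    simp only [List.cons_append, List.foldl_cons, hstep]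
    rw [ih (fun x hx => hu x (by simp [hx])) (w ++ [c]) rest d]
    simp

theorem pv_run_word (u : List Char) (hu : ∀ c ∈ u, PySem.Chars.isspace c = false) (hne : u ≠ [])
    (rest : List Char) (d : List String) :
    List.foldl pvStepB (0, [], d) (u ++ rest) = List.foldl pvStepB (1, u, d) rest := by
  obtain ⟨c, u', rfl⟩ := List.exists_cons_of_ne_nil hne
  have hs := hu c (by simp)
  have hn := pv_ne_nl c hs
  have hstep : pvStepB (0, [], d) c = (1, [c], d) := by simp [pvStepB, hn, hs]
  simp only [List.cons_append, List.foldl_cons, hstep]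
  rw [pv_run1 u' (fun x hx => hu x (by simp [hx])) [c] rest d]
  rfl

theorem pv_step1_ws (c : Char) (w : List Char) (d : List String)
    (hs : PySem.Chars.isspace c = true) (hn : c ≠ '\n') :
    pvStepB (1, w, d) c =
      ((if c = ' ' ∧ (w = "import".toList ∨ w = "from".toList) then 2 else 4), [], d) := by
  simp [pvStepB, hn, hs]

theorem pv_run2 (t : List Char) (ht : ∀ c ∈ t, PySem.Chars.isspace c = true ∧ c ≠ '\n')
    (w rest : List Char) (d : List String) :
    List.foldl pvStepB (2, w, d) (t ++ rest) = List.foldl pvStepB (2, w, d) rest := by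
  induction t with
  | nil => rfl
  | cons c t ih =>
    obtain ⟨hs, hn⟩ := ht c (by simp)
    have hstep : pvStepB (2, w, d) c = (2, w, d) := by simp [pvStepB, hn, hs]
    simp only [List.cons_append, List.foldl_cons, hstep]
    exact ih (fun x hx => ht x (by simp [hx]))

theorem pv_run3 (u : List Char) (hu : ∀ c ∈ u, PySem.Chars.isspace c = false) :
    ∀ (w : List Char) (rest : List Char) (d : List String),
    List.foldl pvStepB (3, w, d) (u ++ rest) = List.foldl pvStepB (3, w ++ u, d) rest := by
  induction u with
  | nil => intro w rest d; simp
  | cons c u ih =>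
    intro w rest d
    have hs := hu c (by simp)
    have hn := pv_ne_nl c hs
    have hstep : pvStepB (3, w, d) c = (3, w ++ [c], d) := by simp [pvStepB, hn, hs]
    simp only [List.cons_append, List.foldl_cons, hstep]
    rw [ih (fun x hx => hu x (by simp [hx])) (w ++ [c]) rest d]
    simp

theorem pv_run_word2 (u : List Char) (hu : ∀ c ∈ u, PySem.Chars.isspace c = false) (hne : u ≠ [])
    (w rest : List Char) (d : List String) :
    List.foldl pvStepB (2, w, d) (u ++ rest) = List.foldl pvStepB (3, u, d) rest := by
  obtain ⟨c, u', rfl⟩ := List.exists_cons_of_ne_nil hne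
  have hs := hu c (by simp)
  have hn := pv_ne_nl c hs
  have hstep : pvStepB (2, w, d) c = (3, [c], d) := by simp [pvStepB, hn, hs]
  simp only [List.cons_append, List.foldl_cons, hstep]
  rw [pv_run3 u' (fun x hx => hu x (by simp [hx])) [c] rest d]
  rfl

theorem pv_step3_ws (c : Char) (w : List Char) (d : List String)
    (hs : PySem.Chars.isspace c = true) (hn : c ≠ '\n') :
    pvStepB (3, w, d) c = (4, [], d ++ pvEmit 3 w) := by
  simp only [pvStepB, pvEmit, if_neg hn, hs, if_pos]
  norm_num
  split_ifs <;> simp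

theorem pv_run4 (t : List Char) (ht : '\n' ∉ t) (w rest : List Char) (d : List String) :
    List.foldl pvStepB (4, w, d) (t ++ rest) = List.foldl pvStepB (4, w, d) rest := by
  induction t with
  | nil => rfl
  | cons c t ih =>
    have hn : c ≠ '\n' := fun h => ht (h ▸ List.mem_cons_self)
    have hstep : pvStepB (4, w, d) c = (4, w, d) := by
      simp only [pvStepB, if_neg hn]
      norm_num
    simp only [List.cons_append, List.foldl_cons, hstep]
    exact ih (fun hx => ht (List.mem_cons_of_mem c hx))

theorem pv_tail_emit (st : Nat) (w : List Char) :
    (List.foldl pvStepB (st, w, []) ['\n']).2.2 = pvEmit st w := by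
  simp [pv_step_nl]

-- ---- the per-line equivalence, case by case ----

-- the indent of a line is whitespace without newlines
theorem pv_indent (l : List Char) (hnl : '\n' ∉ l) :
    ∀ c ∈ l.takeWhile PySem.Chars.isspace, PySem.Chars.isspace c = true ∧ c ≠ '\n' :=
  fun c hc => ⟨List.mem_takeWhile_imp hc,
    fun h => hnl (h ▸ (List.takeWhile_sublist _).subset hc)⟩

theorem pv_ldec (l z : List Char) (hd : l.dropWhile PySem.Chars.isspace = z) (tail : List Char) :
    l ++ tail = l.takeWhile PySem.Chars.isspace ++ (z ++ tail) := by
  conv_lhs => rw [← List.takeWhile_append_dropWhile (p := PySem.Chars.isspace) (l := l), hd]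
  simp

theorem pv_case_eol (l w : List Char) (hnl : '\n' ∉ l)
    (hd : l.dropWhile PySem.Chars.isspace = w)
    (hwns : ∀ c ∈ w, PySem.Chars.isspace c = false) (hwne : w ≠ []) :
    pvLineOut l = pyAline [] l := by
  have hstrip : PySem.Chars.strip l = w := by
    have h := pv_strip_shape l w [] hwns (by rw [hd]; simp)
    simpa [PySem.Chars.rstrip] using h
  have hA : pyAline [] l = [] := by
    apply pyA_no_space
    rw [hstrip]
    intro hsp
    exact absurd (hwns ' ' hsp) (by decide)
  have hB : pvLineOut l = [] := by
    unfold pvLineOut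
    rw [pv_ldec l w hd ['\n'], pv_run0 _ (pv_indent l hnl),
      pv_run_word w hwns hwne, pv_tail_emit]
    simp [pvEmit]
  rw [hB, hA]

theorem pv_case_nokw (l w r2 : List Char) (c1 : Char) (hnl : '\n' ∉ l)
    (hd : l.dropWhile PySem.Chars.isspace = w ++ c1 :: r2)
    (hwns : ∀ c ∈ w, PySem.Chars.isspace c = false) (hwne : w ≠ [])
    (hc1s : PySem.Chars.isspace c1 = true)
    (hg : ¬ (c1 = ' ' ∧ (w = "import".toList ∨ w = "from".toList))) :
    pvLineOut l = pyAline [] l := by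
  have hin : ∀ c ∈ w ++ c1 :: r2, c ∈ l :=
    fun c hc => (List.dropWhile_sublist _).subset (by rw [hd]; exact hc)
  have hc1n : c1 ≠ '\n' := fun h => hnl (h ▸ hin c1 (by simp))
  have hB : pvLineOut l = [] := by
    unfold pvLineOut
    rw [pv_ldec l _ hd ['\n']]
    simp only [List.cons_append, List.append_assoc]
    rw [pv_run0 _ (pv_indent l hnl), pv_run_word w hwns hwne]
    simp only [List.cons_append, List.foldl_cons]
    rw [pv_step1_ws c1 w [] hc1s hc1n, if_neg hg,
      pv_run4 r2 (fun h => hnl (hin '\n' (by simp [h]))) [] ['\n'] [], pv_tail_emit]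
    simp [pvEmit]
  -- if A recognised a keyword, B's guard would have fired
  have hkwfalse : ∀ k : List Char, (∀ c ∈ k, PySem.Chars.isspace c = false) →
      PySem.Chars.startswith (PySem.Chars.strip l) (k ++ [' ']) = true →
      c1 = ' ' ∧ w = k := by
    intro k hknw hb
    obtain ⟨q, hq⟩ := (PySem.Chars.startswith_iff _ _).mp hb
    by_cases hrws : ∃ c ∈ c1 :: r2, PySem.Chars.isspace c = false
    · have hrkeep : PySem.Chars.rstrip (c1 :: r2) ≠ [] := by
        intro h0
        obtain ⟨c, hc, hcs⟩ := hrws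
        have hdec := pv_rstrip_decomp (c1 :: r2)
        rw [h0, List.nil_append] at hdec
        have : PySem.Chars.isspace c = true := by
          rw [hdec] at hc
          exact List.mem_takeWhile_imp (List.mem_reverse.mp hc)
        rw [this] at hcs
        exact absurd hcs (by simp)
      obtain ⟨ch, t', hct⟩ := List.exists_cons_of_ne_nil hrkeep
      have hch : ch = c1 := by
        have hdec := pv_rstrip_decomp (c1 :: r2)
        rw [hct] at hdec
        exact ((List.cons.injEq _ _ _ _).mp hdec.symm).1
      have hstrip : PySem.Chars.strip l = w ++ c1 :: t' := by
        rw [pv_strip_shape l w (c1 :: r2) hwns hd, hct, hch]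
      rw [hstrip] at hq
      have htw1 : (w ++ c1 :: t').takeWhile (fun a => !PySem.Chars.isspace a) = w :=
        pv_takeWhile_word w c1 t' hwns hc1s
      have htw2 : (k ++ ' ' :: q).takeWhile (fun a => !PySem.Chars.isspace a) = k :=
        pv_takeWhile_word k ' ' q hknw (by decide)
      have hkq : k ++ ' ' :: q = w ++ c1 :: t' := by
        rw [← hq]
        simp [List.append_assoc]
      have hwk : w = k := by rw [← htw1, ← hkq, htw2]
      refine ⟨?_, hwk⟩
      rw [hwk] at hkq
      have h2 := List.append_cancel_left hkq
      exact (((List.cons.injEq _ _ _ _).mp h2).1).symm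
    · push_neg at hrws
      have hrall : ∀ c ∈ c1 :: r2, PySem.Chars.isspace c = true := by
        intro c hc
        cases h : PySem.Chars.isspace c with
        | true => rfl
        | false => exact absurd h (hrws c hc)
      have hstrip : PySem.Chars.strip l = w := by
        rw [pv_strip_shape l w (c1 :: r2) hwns hd, pv_rstrip_ws _ hrall, List.append_nil]
      rw [hstrip] at hq
      have hsp : ' ' ∈ w := by
        rw [← hq]
        exact List.mem_append_left q (by simp)
      exact absurd (hwns ' ' hsp) (by decide)
  have h1 : PySem.Chars.startswith (PySem.Chars.strip l) ['i','m','p','o','r','t',' '] = false := by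
    cases hb : PySem.Chars.startswith (PySem.Chars.strip l) ['i','m','p','o','r','t',' '] with
    | false => rfl
    | true =>
      have h := hkwfalse "import".toList pv_import_ns (by simpa using hb)
      exact absurd ⟨h.1, Or.inl h.2⟩ hg
  have h2 : PySem.Chars.startswith (PySem.Chars.strip l) ['f','r','o','m',' '] = false := by
    cases hb : PySem.Chars.startswith (PySem.Chars.strip l) ['f','r','o','m',' '] with
    | false => rfl
    | true =>
      have h := hkwfalse "from".toList pv_from_ns (by simpa using hb)
      exact absurd ⟨h.1, Or.inr h.2⟩ hg
  rw [hB]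
  simp [pyAline, h1, h2]

theorem pv_case_kw_nomod (l w r2 : List Char) (hnl : '\n' ∉ l)
    (hd : l.dropWhile PySem.Chars.isspace = w ++ ' ' :: r2)
    (hwns : ∀ c ∈ w, PySem.Chars.isspace c = false) (hwne : w ≠ [])
    (hkw : w = "import".toList ∨ w = "from".toList)
    (hr2all : ∀ c ∈ r2, PySem.Chars.isspace c = true) :
    pvLineOut l = pyAline [] l := by
  have hin : ∀ c ∈ w ++ ' ' :: r2, c ∈ l :=
    fun c hc => (List.dropWhile_sublist _).subset (by rw [hd]; exact hc)
  have hstrip : PySem.Chars.strip l = w := by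
    rw [pv_strip_shape l w (' ' :: r2) hwns hd, pv_rstrip_ws _ ?_, List.append_nil]
    intro c hc
    rcases List.mem_cons.mp hc with rfl | hc'
    · decide
    · exact hr2all c hc'
  have hA : pyAline [] l = [] := by
    apply pyA_no_space
    rw [hstrip]
    intro hsp
    exact absurd (hwns ' ' hsp) (by decide)
  have hB : pvLineOut l = [] := by
    unfold pvLineOut
    rw [pv_ldec l _ hd ['\n']]
    simp only [List.cons_append, List.append_assoc]
    rw [pv_run0 _ (pv_indent l hnl), pv_run_word w hwns hwne]
    simp only [List.cons_append, List.foldl_cons]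
    rw [pv_step1_ws ' ' w [] (by decide) (by decide), if_pos ⟨rfl, hkw⟩,
      pv_run2 r2 (fun c hc => ⟨hr2all c hc, fun h => hnl (h ▸ hin c (by simp [hc]))⟩) [] ['\n'] [],
      pv_tail_emit]
    simp [pvEmit]
  rw [hB, hA]

theorem pv_case_kw_mod (l w t2 m r4 : List Char) (hnl : '\n' ∉ l)
    (hd : l.dropWhile PySem.Chars.isspace = w ++ ' ' :: (t2 ++ (m ++ r4)))
    (hwns : ∀ c ∈ w, PySem.Chars.isspace c = false) (hwne : w ≠ [])
    (hkw : w = "import".toList ∨ w = "from".toList)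
    (ht2 : ∀ c ∈ t2, PySem.Chars.isspace c = true)
    (hmns : ∀ c ∈ m, PySem.Chars.isspace c = false) (hmne : m ≠ [])
    (hr4 : r4 = [] ∨ ∃ c t, r4 = c :: t ∧ PySem.Chars.isspace c = true) :
    pvLineOut l = pyAline [] l := by
  have hin : ∀ c ∈ w ++ ' ' :: (t2 ++ (m ++ r4)), c ∈ l :=
    fun c hc => (List.dropWhile_sublist _).subset (by rw [hd]; exact hc)
  -- rstrip r4 is empty or headed by whitespace
  have hr4s : PySem.Chars.rstrip r4 = [] ∨
      ∃ c t, PySem.Chars.rstrip r4 = c :: t ∧ PySem.Chars.isspace c = true := by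
    rcases hr4 with rfl | ⟨c, t, rfl, hc⟩
    · exact Or.inl rfl
    · rcases hrr : PySem.Chars.rstrip (c :: t) with _ | ⟨a, t'⟩
      · exact Or.inl rfl
      · right
        refine ⟨a, t', rfl, ?_⟩
        have hdec := pv_rstrip_decomp (c :: t)
        rw [hrr] at hdec
        have : a = c := ((List.cons.injEq _ _ _ _).mp hdec.symm).1
        rw [this]
        exact hc
  have hmnonws : ∃ c ∈ m ++ r4, PySem.Chars.isspace c = false := by
    obtain ⟨cm, m', rfl⟩ := List.exists_cons_of_ne_nil hmne
    exact ⟨cm, by simp, hmns cm (by simp)⟩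
  have hstrip : PySem.Chars.strip l =
      w ++ ' ' :: (t2 ++ (m ++ PySem.Chars.rstrip r4)) := by
    rw [pv_strip_shape l w _ hwns hd,
      show (' ' :: (t2 ++ (m ++ r4)) : List Char) = (' ' :: t2) ++ (m ++ r4) from by simp,
      pv_rstrip_keep _ _ hmnonws, pv_rstrip_append m r4 hmns]
    simp
  have hsplitz : PySem.Chars.split₀ (t2 ++ (m ++ PySem.Chars.rstrip r4)) =
      m :: PySem.Chars.split₀ (PySem.Chars.rstrip r4) := by
    have hdw : (t2 ++ (m ++ PySem.Chars.rstrip r4)).dropWhile PySem.Chars.isspace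
        = m ++ PySem.Chars.rstrip r4 := by
      rw [List.dropWhile_append]
      have h1 : t2.dropWhile PySem.Chars.isspace = [] := by
        rw [List.dropWhile_eq_nil_iff]
        exact ht2
      rw [h1]
      simp only [List.isEmpty_nil, if_true]
      obtain ⟨cm, m', rfl⟩ := List.exists_cons_of_ne_nil hmne
      rw [List.cons_append, List.dropWhile_cons_of_neg]
      simp [hmns cm (by simp)]
    rw [← pv_split0_lstrip, hdw, pv_split0_word_cons m _ hmne hmns hr4s]
  have hAval : pyAline [] l = if pvStd.contains m then [] else [String.ofList m] := by
    rcases hkw with rfl | rfl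
    · have h1 : PySem.Chars.startswith (PySem.Chars.strip l) "import ".toList = true := by
        rw [PySem.Chars.startswith_iff]
        exact ⟨t2 ++ (m ++ PySem.Chars.rstrip r4), by rw [hstrip]; rfl⟩
      have hslice : PySem.List.slice (PySem.Chars.strip l) (some 7) none =
          t2 ++ (m ++ PySem.Chars.rstrip r4) := by
        rw [PySem.List.slice_from _ (by norm_num), hstrip,
          show ("import".toList ++ ' ' :: (t2 ++ (m ++ PySem.Chars.rstrip r4)) : List Char)
            = "import ".toList ++ (t2 ++ (m ++ PySem.Chars.rstrip r4)) from rfl]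
        exact List.drop_left' (by rfl)
      simp only [pyAline, h1, Bool.true_or, if_true, hslice, hsplitz, List.headD_cons]
      rfl
    · have h1 : PySem.Chars.startswith (PySem.Chars.strip l) "import ".toList = false := by
        cases hb : PySem.Chars.startswith (PySem.Chars.strip l) "import ".toList with
        | false => rfl
        | true =>
          obtain ⟨q, hq⟩ := (PySem.Chars.startswith_iff _ _).mp hb
          rw [hstrip] at hq
          simp at hq
      have h2 : PySem.Chars.startswith (PySem.Chars.strip l) "from ".toList = true := by
        rw [PySem.Chars.startswith_iff]
        exact ⟨t2 ++ (m ++ PySem.Chars.rstrip r4), by rw [hstrip]; rfl⟩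
      have hs2 : PySem.Chars.split₀ (PySem.Chars.strip l) =
          "from".toList :: m :: PySem.Chars.split₀ (PySem.Chars.rstrip r4) := by
        rw [hstrip, pv_split0_word_cons "from".toList _ (by simp) pv_from_ns
          (Or.inr ⟨' ', _, rfl, by decide⟩), pv_split0_cons_space _ _ (by decide), hsplitz]
      simp only [pyAline, h1, h2, Bool.false_or, if_true, Bool.false_eq_true, if_false,
        hs2, List.getD_cons_succ, List.getD_cons_zero]
      rfl
  have hB : pvLineOut l = pvEmit 3 m := by
    unfold pvLineOut
    rw [pv_ldec l _ hd ['\n']]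
    simp only [List.cons_append, List.append_assoc]
    rw [pv_run0 _ (pv_indent l hnl), pv_run_word w hwns hwne]
    simp only [List.cons_append, List.foldl_cons]
    rw [pv_step1_ws ' ' w [] (by decide) (by decide), if_pos ⟨rfl, hkw⟩,
      pv_run2 t2 (fun c hc => ⟨ht2 c hc, fun h => hnl (h ▸ hin c (by simp [hc]))⟩) [] _ [],
      pv_run_word2 m hmns hmne]
    rcases hr4 with rfl | ⟨c4, r5, rfl, hc4⟩
    · simp only [List.nil_append]
      rw [pv_tail_emit]
    · have hc4n : c4 ≠ '\n' := fun h => hnl (h ▸ hin c4 (by simp))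
      simp only [List.cons_append, List.foldl_cons]
      rw [pv_step3_ws c4 m [] hc4 hc4n, List.nil_append,
        pv_run4 r5 (fun h => hnl (hin '\n' (by simp [h]))) [] ['\n'] (pvEmit 3 m)]
      simp [pv_step_nl, pvEmit]
  rw [hB, hAval]
  simp only [pvEmit]
  by_cases hcm : pvStd.contains m = true
  · simp [hcm]
  · simp [hcm]

theorem pv_line_main (l : List Char) (hnl : '\n' ∉ l) : pvLineOut l = pyAline [] l := by
  rcases hl1 : l.dropWhile PySem.Chars.isspace with _ | ⟨c0, l1'⟩
  · -- blank line
    have hall : ∀ c ∈ l, PySem.Chars.isspace c = true ∧ c ≠ '\n' := by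
      intro c hc
      exact ⟨List.dropWhile_eq_nil_iff.mp hl1 c hc, fun h => hnl (h ▸ hc)⟩
    have hA : pyAline [] l = [] := by
      apply pyA_no_space
      have h : PySem.Chars.strip l = [] := by
        simp only [PySem.Chars.strip, PySem.Chars.lstrip, hl1]; rfl
      rw [h]; simp
    rw [hA]
    unfold pvLineOut
    rw [pv_run0 l hall ['\n'] [], pv_tail_emit]
    simp [pvEmit]
  · have hc0 : PySem.Chars.isspace c0 = false := pv_head_dropWhile PySem.Chars.isspace l c0 l1' hl1
    have hsplit : l.dropWhile PySem.Chars.isspace =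
        (c0 :: l1').takeWhile (fun c => !PySem.Chars.isspace c)
          ++ (c0 :: l1').dropWhile (fun c => !PySem.Chars.isspace c) := by
      rw [hl1, List.takeWhile_append_dropWhile]
    have hwns : ∀ c ∈ (c0 :: l1').takeWhile (fun c => !PySem.Chars.isspace c),
        PySem.Chars.isspace c = false := fun c hc => by simpa using List.mem_takeWhile_imp hc
    have hwne : (c0 :: l1').takeWhile (fun c => !PySem.Chars.isspace c) ≠ [] := by
      rw [List.takeWhile_cons_of_pos (by simp [hc0])]
      simp
    rcases hrr : (c0 :: l1').dropWhile (fun c => !PySem.Chars.isspace c) with _ | ⟨c1, r2⟩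
    · exact pv_case_eol l _ hnl (by rw [hsplit, hrr, List.append_nil]) hwns hwne
    · have hc1s : PySem.Chars.isspace c1 = true := by
        simpa using pv_head_dropWhile (fun c => !PySem.Chars.isspace c) (c0 :: l1') c1 r2 hrr
      by_cases hg : c1 = ' ' ∧ ((c0 :: l1').takeWhile (fun c => !PySem.Chars.isspace c) = "import".toList
          ∨ (c0 :: l1').takeWhile (fun c => !PySem.Chars.isspace c) = "from".toList)
      · obtain ⟨rfl, hkw⟩ := hg
        rcases hr3 : r2.dropWhile PySem.Chars.isspace with _ | ⟨c3, r3'⟩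
        · -- only whitespace after the keyword
          exact pv_case_kw_nomod l _ r2 hnl (by rw [hsplit, hrr]) hwns hwne hkw
            (List.dropWhile_eq_nil_iff.mp hr3)
        · -- a module word follows
          have hc3 : PySem.Chars.isspace c3 = false :=
            pv_head_dropWhile PySem.Chars.isspace r2 c3 r3' hr3
          have hmns : ∀ c ∈ (c3 :: r3').takeWhile (fun c => !PySem.Chars.isspace c),
              PySem.Chars.isspace c = false := fun c hc => by simpa using List.mem_takeWhile_imp hc
          have hmne : (c3 :: r3').takeWhile (fun c => !PySem.Chars.isspace c) ≠ [] := by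
            rw [List.takeWhile_cons_of_pos (by simp [hc3])]
            simp
          have hr2dec : r2 = r2.takeWhile PySem.Chars.isspace
              ++ ((c3 :: r3').takeWhile (fun c => !PySem.Chars.isspace c)
                ++ (c3 :: r3').dropWhile (fun c => !PySem.Chars.isspace c)) := by
            conv_lhs => rw [← List.takeWhile_append_dropWhile (p := PySem.Chars.isspace) (l := r2), hr3]
            rw [List.takeWhile_append_dropWhile]
          have hr4sh : (c3 :: r3').dropWhile (fun c => !PySem.Chars.isspace c) = [] ∨
              ∃ c t, (c3 :: r3').dropWhile (fun c => !PySem.Chars.isspace c) = c :: t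
                ∧ PySem.Chars.isspace c = true := by
            rcases hr4c : (c3 :: r3').dropWhile (fun c => !PySem.Chars.isspace c) with _ | ⟨c4, r5⟩
            · exact Or.inl rfl
            · right
              refine ⟨c4, r5, rfl, ?_⟩
              simpa using pv_head_dropWhile (fun c => !PySem.Chars.isspace c) (c3 :: r3') c4 r5 hr4c
          have hd' : l.dropWhile PySem.Chars.isspace =
              (c0 :: l1').takeWhile (fun c => !PySem.Chars.isspace c)
                ++ ' ' :: (r2.takeWhile PySem.Chars.isspace
                  ++ ((c3 :: r3').takeWhile (fun c => !PySem.Chars.isspace c)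
                    ++ (c3 :: r3').dropWhile (fun c => !PySem.Chars.isspace c))) := by
            rw [hsplit, hrr]
            conv_lhs => rw [hr2dec]
          exact pv_case_kw_mod l _ (r2.takeWhile PySem.Chars.isspace) _ _ hnl
            hd' hwns hwne hkw
            (fun c hc => List.mem_takeWhile_imp hc) hmns hmne hr4sh
      · exact pv_case_nokw l _ r2 c1 hnl (by rw [hsplit, hrr]) hwns hwne hc1s hg

theorem pv_flatMap_eq (L : List (List Char)) (h : ∀ l ∈ L, '\n' ∉ l) :
    L.flatMap (pyAline []) = L.flatMap pvLineOut := by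
  induction L with
  | nil => rfl
  | cons a L ih =>
    rw [List.flatMap_cons, List.flatMap_cons, ← pv_line_main a (h a (by simp)),
      ih (fun l hl => h l (by simp [hl]))]

-- ===== VERDICT (by name: the statement is the Claim_ definition above) =====
theorem extract_python_dependencies_py_spec : Claim_equal_extract_python_dependencies_py := by
  intro content _hdom
  unfold Spec_extract_python_dependencies_py
  rw [pv_portA_flatMap, pvLines_eq, pv_alt_eq,
    pv_flatMap_eq _ (pvLines_no_newline content.toList)]
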